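-- pv_equiv track=rewrite | github.com/PiotrGry/qse-pkg | optimizations/constraints_benchmark/optimized_constraints.py | _build_edge_cache
-- ===== SOURCE A (Python) =====
-- from collections import defaultdict
-- from typing import Dict, Iterable, List, Optional, Sequence, Tuple
--
-- EdgeRow = Tuple[str, str, str, str]  # (src, tgt, src_path, tgt_path)
--
-- def _build_edge_cache(edges: Iterable[Tuple[str, str]]) -> Tuple[List[EdgeRow], Dict[str, List[EdgeRow]]]:
--     """Precompute path-converted edges and root index."""
--     rows: List[EdgeRow] = []
--     by_root: Dict[str, List[EdgeRow]] = defaultdict(list)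
--     for src, tgt in edges:
--         src_path = src.replace(".", "/")
--         tgt_path = tgt.replace(".", "/")
--         row = (src, tgt, src_path, tgt_path)
--         rows.append(row)
--         root = src_path.split("/", 1)[0]
--         by_root[root].append(row)
--     return rows, by_root
-- ===== SOURCE B (Python) =====
-- from collections import defaultdict
--
--
-- def _build_edge_cache(edges):
--     """Dedupe-then-filter grouping: collect the distinct roots first (in first-
--     occurrence order), then build each root's bucket by one filter pass over the
--     row table, instead of growing the index incrementally."""
--     rows = []
--     for src, tgt in edges:
--         rows.append((src, tgt, src.replace(".", "/"), tgt.replace(".", "/")))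
--     roots = list(dict.fromkeys(row[2].split("/", 1)[0] for row in rows))
--     by_root = defaultdict(list)
--     for root in roots:
--         by_root[root] = [row for row in rows if row[2].split("/", 1)[0] == root]
--     return rows, by_root
-- ===== Notes on version B (the rewrite author's own statement) =====
-- stated objective: alternative
-- what changed: Replaces A's incremental defaultdict grouping (append each row into its root bucket as the fused loop runs) by a dedupe-then-filter scheme: collect the distinct roots in first-occurrence order with dict.fromkeys, then build each root's bucket by a separate filter pass over the precomputed row table.
import Mathlib
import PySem

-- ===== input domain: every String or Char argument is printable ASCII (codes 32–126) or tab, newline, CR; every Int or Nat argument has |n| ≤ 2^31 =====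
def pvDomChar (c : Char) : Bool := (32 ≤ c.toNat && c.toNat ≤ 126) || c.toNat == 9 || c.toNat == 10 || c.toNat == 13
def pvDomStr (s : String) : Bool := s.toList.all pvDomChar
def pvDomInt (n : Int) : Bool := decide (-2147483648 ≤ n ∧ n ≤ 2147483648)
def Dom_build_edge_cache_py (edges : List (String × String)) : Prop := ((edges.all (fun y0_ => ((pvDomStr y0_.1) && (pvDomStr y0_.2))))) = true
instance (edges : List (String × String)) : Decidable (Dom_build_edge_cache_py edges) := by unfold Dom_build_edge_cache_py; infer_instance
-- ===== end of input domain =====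

-- B replaces A's incremental defaultdict grouping by dedupe-then-filter: collect the
-- distinct roots in first-occurrence order, then build each root's bucket with a filter
-- pass over the row table; return value only (same rows, same insertion-ordered index).

-- ===== PORT A =====
-- src_path.split("/", 1)[0]: the separator "/" is nonempty, so splitMax? is `some`
-- of a nonempty list and the [0] never raises; the defaults here are unreachable.
def pvRoot (src_path : String) : String :=
  (((PySem.Str.splitMax? src_path "/" 1).getD []).headD "")

def build_edge_cache_py (edges : List (String × String)) : (List (String × String × String × String)) × (List (String × List (String × String × String × String))) :=
  let st := edges.foldl
    (fun (st : List (String × String × String × String) × PySem.Dict String (List (String × String × String × String))) e =>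
      let src := e.1
      let tgt := e.2
      let src_path := PySem.Str.replace src "." "/"
      let tgt_path := PySem.Str.replace tgt "." "/"
      let row := (src, tgt, src_path, tgt_path)
      let root := pvRoot src_path
      (st.1 ++ [row], st.2.modify root [] (· ++ [row])))
    ([], PySem.Dict.empty)
  (st.1, st.2.items)

-- ===== PORT B =====
def build_edge_cache_py_alt (edges : List (String × String)) : (List (String × String × String × String)) × (List (String × List (String × String × String × String))) :=
  let rows := edges.foldl
    (fun (acc : List (String × String × String × String)) e =>
      acc ++ [(e.1, e.2, PySem.Str.replace e.1 "." "/", PySem.Str.replace e.2 "." "/")]) []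
  -- list(dict.fromkeys(...)) = ordered dedup
  let roots := PySem.List.dedup (rows.map (fun row => pvRoot row.2.2.1))
  let by_root := roots.foldl
    (fun (d : PySem.Dict String (List (String × String × String × String))) root =>
      d.insert root (rows.filter (fun row => pvRoot row.2.2.1 == root)))
    PySem.Dict.empty
  (rows, by_root.items)

-- ===== PRECONDITION & SPEC =====
def Spec_build_edge_cache_py (edges : List (String × String)) (out : (List (String × String × String × String)) × (List (String × List (String × String × String × String)))) : Prop := out = build_edge_cache_py_alt edges
instance (edges : List (String × String)) (out : (List (String × String × String × String)) × (List (String × List (String × String × String × String)))) : Decidable (Spec_build_edge_cache_py edges out) := by unfold Spec_build_edge_cache_py; infer_instance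

-- ===== CLAIM =====
def Claim_equal_build_edge_cache_py : Prop := ∀ (edges : List (String × String)), Dom_build_edge_cache_py edges → Spec_build_edge_cache_py edges (build_edge_cache_py edges)

-- ===== LEMMAS AND PROOFS =====

-- abbreviations used only by the proofs
def pvMkRow (e : String × String) : String × String × String × String :=
  (e.1, e.2, PySem.Str.replace e.1 "." "/", PySem.Str.replace e.2 "." "/")

def pvRowRoot (row : String × String × String × String) : String := pvRoot row.2.2.1

-- A's fused loop, split into its two independent components (generalized accumulators).
theorem pvFused_split (edges : List (String × String))
    (rs : List (String × String × String × String))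
    (d : PySem.Dict String (List (String × String × String × String))) :
    edges.foldl
      (fun (st : List (String × String × String × String) × PySem.Dict String (List (String × String × String × String))) e =>
        let src := e.1
        let tgt := e.2
        let src_path := PySem.Str.replace src "." "/"
        let tgt_path := PySem.Str.replace tgt "." "/"
        let row := (src, tgt, src_path, tgt_path)
        let root := pvRoot src_path
        (st.1 ++ [row], st.2.modify root [] (· ++ [row])))
      (rs, d)
    = (rs ++ edges.map pvMkRow,
       (edges.map pvMkRow).foldl
         (fun d row => d.modify (pvRowRoot row) [] (· ++ [row])) d) := by
  induction edges generalizing rs d with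
  | nil => simp
  | cons e rest ih => simp [ih, List.append_assoc, pvMkRow, pvRowRoot]

-- The dict grown by A's modify-loop, described key by key.
theorem pvModifyLoop_getD (rows : List (String × String × String × String)) (k : String) :
    ((rows.foldl (fun d row => d.modify (pvRowRoot row) [] (· ++ [row]))
        (PySem.Dict.empty : PySem.Dict String (List (String × String × String × String)))).getD k [])
    = rows.filter (fun row => pvRowRoot row == k) := by
  have h := PySem.Dict.getD_foldl_modify_append
    (l := rows.map (fun row => (pvRowRoot row, row)))
    (d := (PySem.Dict.empty : PySem.Dict String (List (String × String × String × String)))) (c := k)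
  rw [List.foldl_map] at h
  simpa [List.filter_map, List.map_map, Function.comp_def] using h

-- A's grouped dict and B's insert-loop dict have the same items list.
theorem pvItems_eq (rows : List (String × String × String × String)) :
    ((rows.foldl (fun d row => d.modify (pvRowRoot row) [] (· ++ [row]))
        (PySem.Dict.empty : PySem.Dict String (List (String × String × String × String)))).items)
    = ((PySem.List.dedup (rows.map pvRowRoot)).foldl
        (fun (d : PySem.Dict String (List (String × String × String × String))) root =>
          d.insert root (rows.filter (fun row => pvRowRoot row == root)))
        PySem.Dict.empty).items := by
  -- left side: items = keys.map (k, getD k [])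
  have hk : ((rows.foldl (fun d row => d.modify (pvRowRoot row) [] (· ++ [row]))
        (PySem.Dict.empty : PySem.Dict String (List (String × String × String × String)))).keys)
      = PySem.Set.ofList (rows.map pvRowRoot) := by
    have := PySem.Dict.keys_foldl_modify_key (l := rows) (key := pvRowRoot)
      (d0 := ([] : List (String × String × String × String)))
      (f := fun _ row => (· ++ [row]))
      (d := (PySem.Dict.empty : PySem.Dict String (List (String × String × String × String))))
    simpa using this
  have hnd : ((rows.foldl (fun d row => d.modify (pvRowRoot row) [] (· ++ [row]))
        (PySem.Dict.empty : PySem.Dict String (List (String × String × String × String)))).keys).Nodup := by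
    rw [hk]; exact PySem.Set.nodup_ofList _
  have hL := PySem.Dict.items_eq_map_keys
    (d := rows.foldl (fun d row => d.modify (pvRowRoot row) [] (· ++ [row]))
        (PySem.Dict.empty : PySem.Dict String (List (String × String × String × String))))
    hnd ([] : List (String × String × String × String))
  -- right side: fresh distinct keys append
  have hndk : ((PySem.List.dedup (rows.map pvRowRoot)).map id).Nodup := by
    simp
  have hR := PySem.Dict.items_foldl_insert_fresh
    (l := PySem.List.dedup (rows.map pvRowRoot)) (k := id)
    (v := fun root => rows.filter (fun row => pvRowRoot row == root))
    (d := (PySem.Dict.empty : PySem.Dict String (List (String × String × String × String))))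
    (by intro a _; simp) hndk
  simp only [id] at hR
  rw [hL, hR, hk]
  simp [PySem.List.dedup_eq_ofList, PySem.Dict.empty]
  intro a _ _ _ _ _ _
  exact pvModifyLoop_getD rows a

-- ===== VERDICT =====
theorem build_edge_cache_py_spec : Claim_equal_build_edge_cache_py := by
  intro edges _
  unfold Spec_build_edge_cache_py build_edge_cache_py build_edge_cache_py_alt
  rw [pvFused_split]
  have hrows : edges.foldl
      (fun (acc : List (String × String × String × String)) e =>
        acc ++ [(e.1, e.2, PySem.Str.replace e.1 "." "/", PySem.Str.replace e.2 "." "/")]) []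
      = edges.map pvMkRow := by
    simpa [pvMkRow] using PySem.List.foldl_append_singleton_eq_map (l := edges) (f := pvMkRow)
  simp only [hrows]
  exact congrArg _ (pvItems_eq (edges.map pvMkRow))
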